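-- pv_equiv track=rewrite | github.com/yitayalDev/navigator | backend/ai_server.py | format_locations_for_ai
-- ===== SOURCE A (Python) =====
-- def format_locations_for_ai(locations: list) -> str:
--     """Format locations into readable text for AI"""
--     if not locations:
--         return "No specific locations found."
--
--     formatted = []
--
--     # Group by campus
--     by_campus = {}
--     for loc in locations:
--         campus = loc.get('campus', 'unknown').upper()
--         if campus not in by_campus:
--             by_campus[campus] = []
--         by_campus[campus].append(loc)
--
--     for campus, locs in by_campus.items():
--         formatted.append(f"\n=== {campus} CAMPUS ===")
--
--         # Group by category
--         by_category = {}
--         for loc in locs: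
--             cat = loc.get('category', 'other').replace('_', ' ').title()
--             if cat not in by_category:
--                 by_category[cat] = []
--             by_category[cat].append(loc)
--
--         for cat, cat_locs in by_category.items():
--             formatted.append(f"\n[{cat}s]:")
--             for loc in cat_locs:
--                 name = loc.get('name', 'Unknown')
--                 desc = loc.get('description', '')
--                 coords = loc.get('coords', '')
--                 formatted.append(f"  - {name}: {desc} (Coords: {coords})")
--
--     return "\n".join(formatted)
-- ===== SOURCE B (Python) =====
-- def format_locations_for_ai(locations: list) -> str:
--     """Format locations into readable text for AI (dedup+filter decomposition)."""
--     if not locations: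
--         return "No specific locations found."
--
--     def campus_of(loc):
--         return loc.get('campus', 'unknown').upper()
--
--     def cat_of(loc):
--         return loc.get('category', 'other').replace('_', ' ').title()
--
--     lines = []
--     for campus in dict.fromkeys(campus_of(l) for l in locations):
--         lines.append(f"\n=== {campus} CAMPUS ===")
--         locs = [l for l in locations if campus_of(l) == campus]
--         for cat in dict.fromkeys(cat_of(l) for l in locs):
--             lines.append(f"\n[{cat}s]:")
--             lines.extend(
--                 f"  - {l.get('name', 'Unknown')}: {l.get('description', '')} (Coords: {l.get('coords', '')})"
--                 for l in locs if cat_of(l) == cat)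
--     return "\n".join(lines)
-- ===== Notes on version B (the rewrite author's own statement) =====
-- stated objective: simpler
-- what changed: A interleaves grouping and rendering by accumulating dicts of lists (setdefault-then-append) per campus and then per category; B never builds a dict of lists: it computes the distinct campuses/categories in first-seen order with dict.fromkeys and renders each group by filtering the location list, at the cost of rescanning the list per group.
import Mathlib
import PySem

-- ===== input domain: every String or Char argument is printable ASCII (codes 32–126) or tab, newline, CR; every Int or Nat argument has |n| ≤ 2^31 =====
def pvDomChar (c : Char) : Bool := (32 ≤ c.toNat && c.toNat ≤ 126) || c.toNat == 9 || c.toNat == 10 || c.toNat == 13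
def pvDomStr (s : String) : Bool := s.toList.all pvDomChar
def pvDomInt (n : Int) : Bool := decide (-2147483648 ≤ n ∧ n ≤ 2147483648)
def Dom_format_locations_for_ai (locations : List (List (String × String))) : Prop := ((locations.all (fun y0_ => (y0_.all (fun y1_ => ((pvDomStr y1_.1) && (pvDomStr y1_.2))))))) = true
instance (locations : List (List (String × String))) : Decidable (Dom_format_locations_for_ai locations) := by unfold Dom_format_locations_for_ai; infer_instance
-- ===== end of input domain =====

-- B differs from A only in decomposition: A accumulates dicts of lists while looping; B lists the
-- distinct campuses/categories first (dict.fromkeys) and renders each group by filtering. Objective: simpler.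

-- shared helpers (identical code in both Pythons): loc.get(key, dflt) on the dict, str.title (ported
-- by hand, exact on ASCII: a letter is uppercased after a non-letter, lowercased otherwise), and the
-- per-location line.
def pvGet (loc : List (String × String)) (key dflt : String) : String :=
  (PySem.Dict.mk loc).getD key dflt

def pvTitleAux : Bool → List Char → List Char
  | _, [] => []
  | prevCased, c :: rest =>
    let cased := PySem.Chars.isalpha c
    (if cased then (if prevCased then PySem.Chars.lowerChar c else PySem.Chars.upperChar c) else c)
      :: pvTitleAux cased rest

def pvTitle (s : String) : String := String.ofList (pvTitleAux false s.toList)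

def pvCampusOf (loc : List (String × String)) : String :=
  PySem.Str.upper (pvGet loc "campus" "unknown")

def pvCatOf (loc : List (String × String)) : String :=
  pvTitle (PySem.Str.replace (pvGet loc "category" "other") "_" " ")

def pvLine (loc : List (String × String)) : String :=
  "  - " ++ pvGet loc "name" "Unknown" ++ ": " ++ pvGet loc "description" "" ++
    " (Coords: " ++ pvGet loc "coords" "" ++ ")"

-- ===== PORT A =====
def format_locations_for_ai (locations : List (List (String × String))) : String :=
  if locations = [] then "No specific locations found."
  else
    let by_campus : PySem.Dict String (List (List (String × String))) :=
      locations.foldl (fun d loc =>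
        (if d.contains (pvCampusOf loc) then d else d.insert (pvCampusOf loc) []).modify
          (pvCampusOf loc) [] (· ++ [loc])) PySem.Dict.empty
    let formatted : List String :=
      by_campus.items.foldl (fun fmt cl =>
        let by_category : PySem.Dict String (List (List (String × String))) :=
          cl.2.foldl (fun d loc =>
            (if d.contains (pvCatOf loc) then d else d.insert (pvCatOf loc) []).modify
              (pvCatOf loc) [] (· ++ [loc])) PySem.Dict.empty
        by_category.items.foldl (fun fmt cc =>
          cc.2.foldl (fun fmt loc => fmt ++ [pvLine loc])
            (fmt ++ ["\n[" ++ cc.1 ++ "s]:"]))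
          (fmt ++ ["\n=== " ++ cl.1 ++ " CAMPUS ==="])) []
    PySem.Str.join "\n" formatted

-- ===== PORT B =====
def format_locations_for_ai_alt (locations : List (List (String × String))) : String :=
  if locations = [] then "No specific locations found."
  else
    let lines : List String :=
      (PySem.List.dedup (locations.map pvCampusOf)).foldl (fun lines campus =>
        (PySem.List.dedup ((locations.filter (fun l => pvCampusOf l == campus)).map pvCatOf)).foldl
          (fun lines cat =>
            (lines ++ ["\n[" ++ cat ++ "s]:"]) ++
              (((locations.filter (fun l => pvCampusOf l == campus)).filter
                  (fun l => pvCatOf l == cat)).map pvLine))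
          (lines ++ ["\n=== " ++ campus ++ " CAMPUS ==="])) []
    PySem.Str.join "\n" lines

-- ===== PRECONDITION & SPEC =====
def Spec_format_locations_for_ai (locations : List (List (String × String))) (out : String) : Prop := out = format_locations_for_ai_alt locations
instance (locations : List (List (String × String))) (out : String) : Decidable (Spec_format_locations_for_ai locations out) := by unfold Spec_format_locations_for_ai; infer_instance

-- ===== CLAIM (what is proved, stated in full; the proofs are below) =====
def Claim_equal_format_locations_for_ai : Prop := ∀ (locations : List (List (String × String))), Dom_format_locations_for_ai locations → Spec_format_locations_for_ai locations (format_locations_for_ai locations)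

-- ===== LEMMAS AND PROOFS =====

-- two foldls over the same list with pointwise-equal step functions agree
theorem pv_foldl_ext {α β : Type} (f g : β → α → β) (i : β) (l : List α)
    (h : ∀ a b, f a b = g a b) : l.foldl f i = l.foldl g i := by
  induction l generalizing i with
  | nil => rfl
  | cons x xs ih => simp only [List.foldl_cons, h, ih]

-- A's setdefault-then-append step is a single modify.
theorem pv_step_eq {α : Type} (k : α → String) (d : PySem.Dict String (List α)) (x : α) :
    (if d.contains (k x) then d else d.insert (k x) []).modify (k x) [] (· ++ [x])
      = d.modify (k x) [] (· ++ [x]) := by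
  by_cases h : d.contains (k x) = true
  · simp [h]
  · simp [h, PySem.Dict.modify, PySem.Dict.getD_insert_self,
      PySem.Dict.insert_insert_self, PySem.Dict.getD_of_not_contains]

-- the items of A's grouping dict are exactly B's dedup-of-keys paired with filters
theorem pv_items_group {α : Type} (k : α → String) (xs : List α) :
    (xs.foldl (fun d x =>
        (if d.contains (k x) then d else d.insert (k x) []).modify (k x) [] (· ++ [x]))
      PySem.Dict.empty).items
    = (PySem.List.dedup (xs.map k)).map (fun c => (c, xs.filter (fun x => k x == c))) := by
  simp only [pv_step_eq k]
  have hnd : (xs.foldl (fun d x => d.modify (k x) [] (· ++ [x]))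
      (PySem.Dict.empty : PySem.Dict String (List α))).keys.Nodup :=
    PySem.Dict.nodup_keys_foldl_modify_key xs k [] (fun _ x v => v ++ [x]) _ (by simp)
  rw [PySem.Dict.items_eq_map_keys _ hnd []]
  have hkeys : (xs.foldl (fun d x => d.modify (k x) [] (· ++ [x]))
      (PySem.Dict.empty : PySem.Dict String (List α))).keys = PySem.List.dedup (xs.map k) := by
    rw [PySem.Dict.keys_foldl_modify_key xs k [] (fun _ x v => v ++ [x])]
    simp [PySem.List.dedup_eq_ofList]
    rfl
  rw [hkeys]
  apply List.map_congr_left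
  intro c _
  have hfold : xs.foldl (fun d x => d.modify (k x) [] (· ++ [x]))
      (PySem.Dict.empty : PySem.Dict String (List α))
      = (xs.map (fun x => (k x, x))).foldl (fun d p => d.modify p.1 [] (· ++ [p.2]))
          PySem.Dict.empty := by
    rw [List.foldl_map]
  rw [hfold, PySem.Dict.getD_foldl_modify_append]
  simp [List.filter_map, Function.comp_def]

-- ===== VERDICT (by name: the statement is the Claim_ definition above) =====
theorem format_locations_for_ai_spec : Claim_equal_format_locations_for_ai := by
  intro locations _
  unfold Spec_format_locations_for_ai format_locations_for_ai format_locations_for_ai_alt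
  by_cases h : locations = []
  · simp [h]
  · simp only [h, if_neg, not_false_iff]
    rw [pv_items_group pvCampusOf locations, List.foldl_map]
    congr 1
    apply pv_foldl_ext
    intro fmt campus
    rw [pv_items_group pvCatOf, List.foldl_map]
    apply pv_foldl_ext
    intro fmt2 cat
    rw [PySem.List.foldl_append_singleton_eq_map]
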